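-- pv_equiv track=rewrite | github.com/jayantsolanki/cross_a_crater | Practice/implementation code/motion.py | getcoor
-- ===== SOURCE A (Python) =====
-- grid_line_x = 24
--
-- grid_line_y = 13
--
-- def getcoor(x,y,m,n):
--         X=0
--         Y=0
--         for i in range(0, grid_line_x): ##drawing lines
--                 X=X+m
--                 Y=0
--                 for j in range(0, grid_line_y): ##drawing lines
--                         Y=Y+n
--                         # print X,Y,x,y
--                         # print i,j
--                         if x<=X and y<=Y:
--                             return i,j
--                             break
-- ===== SOURCE B (Python) =====
-- grid_line_x = 24
--
-- grid_line_y = 13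
--
-- def _first_hit(v, step, limit):
--     acc = 0
--     for k in range(limit):
--         acc += step
--         if v <= acc:
--             return k
--     return None
--
-- def getcoor(x, y, m, n):
--     i = _first_hit(x, m, grid_line_x)
--     j = _first_hit(y, n, grid_line_y)
--     if i is not None and j is not None:
--         return i, j
-- ===== Notes on version B (the rewrite author's own statement) =====
-- stated objective: simpler
-- what changed: The x- and y-conditions are independent, so the nested 24x13 scan is replaced by two separate single-pass accumulator searches (one per axis) whose results are combined only if both exist.
import Mathlib
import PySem

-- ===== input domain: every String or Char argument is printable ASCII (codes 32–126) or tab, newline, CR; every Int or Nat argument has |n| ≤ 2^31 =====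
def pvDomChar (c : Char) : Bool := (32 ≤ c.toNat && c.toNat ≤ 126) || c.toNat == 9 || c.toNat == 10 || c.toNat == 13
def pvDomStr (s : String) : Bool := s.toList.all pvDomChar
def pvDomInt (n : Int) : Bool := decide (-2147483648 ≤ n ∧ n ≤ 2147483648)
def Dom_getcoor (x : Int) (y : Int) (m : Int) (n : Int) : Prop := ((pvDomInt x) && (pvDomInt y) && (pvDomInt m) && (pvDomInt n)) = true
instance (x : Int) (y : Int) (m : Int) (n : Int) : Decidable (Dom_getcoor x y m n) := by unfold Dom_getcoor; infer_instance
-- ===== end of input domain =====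

-- B splits A's nested 24x13 scan into two independent single-pass accumulator
-- searches (one per axis), combined only if both succeed; objective: simpler.

-- ===== PORT A =====
-- inner j-loop of A: Y accumulates n, j counts up, fuel = remaining iterations
def getcoorLoopJ (x y X n i : Int) (Y j : Int) : Nat → Option (Int × Int)
  | 0 => none
  | fuel + 1 =>
    let Y' := Y + n
    if x ≤ X ∧ y ≤ Y' then some (i, j) else getcoorLoopJ x y X n i Y' (j + 1) fuel

-- outer i-loop of A: X accumulates m, Y reset to 0 each iteration
def getcoorLoopI (x y m n : Int) (X i : Int) : Nat → Option (Int × Int)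
  | 0 => none
  | fuel + 1 =>
    let X' := X + m
    match getcoorLoopJ x y X' n i 0 0 13 with
    | some r => some r
    | none => getcoorLoopI x y m n X' (i + 1) fuel

def getcoor (x : Int) (y : Int) (m : Int) (n : Int) : Option (Int × Int) :=
  getcoorLoopI x y m n 0 0 24

-- ===== PORT B =====
-- B's helper _first_hit: first index k (acc accumulating step) with v ≤ acc
def firstHit (v step : Int) (acc k : Int) : Nat → Option Int
  | 0 => none
  | fuel + 1 =>
    let acc' := acc + step
    if v ≤ acc' then some k else firstHit v step acc' (k + 1) fuel

def getcoor_alt (x : Int) (y : Int) (m : Int) (n : Int) : Option (Int × Int) :=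
  match firstHit x m 0 0 24, firstHit y n 0 0 13 with
  | some i, some j => some (i, j)
  | _, _ => none

-- ===== PRECONDITION & SPEC =====
def Spec_getcoor (x : Int) (y : Int) (m : Int) (n : Int) (out : Option (Int × Int)) : Prop := out = getcoor_alt x y m n
instance (x : Int) (y : Int) (m : Int) (n : Int) (out : Option (Int × Int)) : Decidable (Spec_getcoor x y m n out) := by unfold Spec_getcoor; infer_instance

-- ===== CLAIM (what is proved, stated in full; the proofs are below) =====
def Claim_equal_getcoor : Prop := ∀ (x : Int) (y : Int) (m : Int) (n : Int), Dom_getcoor x y m n → Spec_getcoor x y m n (getcoor x y m n)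

-- ===== LEMMAS AND PROOFS =====

-- A's inner loop factors: if x ≤ X it is B's y-search (tagged with i), else it finds nothing
theorem loopJ_eq (x y X n i Y j : Int) (fuel : Nat) :
    getcoorLoopJ x y X n i Y j fuel =
      if x ≤ X then (firstHit y n Y j fuel).map (fun jj => (i, jj)) else none := by
  induction fuel generalizing Y j with
  | zero => simp [getcoorLoopJ, firstHit]
  | succ f ih =>
    simp only [getcoorLoopJ, firstHit, ih]
    by_cases hx : x ≤ X <;> by_cases hy : y ≤ Y + n <;> simp [hx, hy]

-- A's outer loop equals B's combination of the two searches
theorem loopI_eq (x y m n X i : Int) (fuel : Nat) :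
    getcoorLoopI x y m n X i fuel =
      match firstHit x m X i fuel, firstHit y n 0 0 13 with
      | some ii, some jj => some (ii, jj)
      | _, _ => none := by
  induction fuel generalizing X i with
  | zero => simp [getcoorLoopI, firstHit]
  | succ f ih =>
    have hA : getcoorLoopI x y m n X i (f + 1) =
        match getcoorLoopJ x y (X + m) n i 0 0 13 with
        | some r => some r
        | none => getcoorLoopI x y m n (X + m) (i + 1) f := rfl
    have hB : firstHit x m X i (f + 1) =
        if x ≤ X + m then some i else firstHit x m (X + m) (i + 1) f := rfl
    rw [hA, hB, loopJ_eq, ih]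
    cases h : firstHit y n 0 0 13 with
    | none =>
      by_cases hx : x ≤ X + m <;> simp [hx]
    | some jj =>
      by_cases hx : x ≤ X + m <;> simp [hx]

-- ===== VERDICT (by name: the statement is the Claim_ definition above) =====
theorem getcoor_spec : Claim_equal_getcoor := by
  intro x y m n _
  unfold Spec_getcoor getcoor getcoor_alt
  rw [loopI_eq]
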